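-- pv_equiv track=rewrite | github.com/pypi-data/pypi-mirror-80 | packages/musikla/musikla-0.7.1-py3-none-any.whl/musikla/parser/abstract_syntax_tree/macros/keyboard.py | handle_modifiers
-- ===== SOURCE A (Python) =====
-- from typing import Any, Dict, List, Optional, Tuple, cast
--
-- ModifierNames = [ 'hold', 'extend', 'toggle', 'repeat', 'release' ]
--
-- def handle_modifiers ( modifiers : List[str] ) -> Tuple[Dict[str, bool], Optional[str]]:
--     props = dict()
--
--     rest = None
--
--     for i in range( len( modifiers ) - 1, -1, -1 ):
--         if modifiers[ i ] in ModifierNames: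
--             props[ modifiers[ i ] ] = True
--         else:
--             rest = '+'.join( modifiers[ 0:i + 1 ] )
--             break
--
--     return (props, rest)
-- ===== SOURCE B (Python) =====
-- from typing import Dict, List, Optional, Tuple
--
-- ModifierNames = ['hold', 'extend', 'toggle', 'repeat', 'release']
--
-- def handle_modifiers(modifiers: List[str]) -> Tuple[Dict[str, bool], Optional[str]]:
--     # Forward pass: find the last index holding a non-modifier element.
--     last = -1
--     for i, m in enumerate(modifiers):
--         if m not in ModifierNames:
--             last = i
--     rest = '+'.join(modifiers[:last + 1]) if last >= 0 else None
--     # reversed() keeps A's insertion order (dict equality ignores it anyway)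
--     props = {m: True for m in reversed(modifiers[last + 1:])}
--     return (props, rest)
-- ===== Notes on version B (the rewrite author's own statement) =====
-- stated objective: alternative
-- what changed: Replaces the reverse index loop with break by a forward boundary-finding pass plus two slice-based constructions (join of the prefix, dict comprehension over the suffix).
import Mathlib
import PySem

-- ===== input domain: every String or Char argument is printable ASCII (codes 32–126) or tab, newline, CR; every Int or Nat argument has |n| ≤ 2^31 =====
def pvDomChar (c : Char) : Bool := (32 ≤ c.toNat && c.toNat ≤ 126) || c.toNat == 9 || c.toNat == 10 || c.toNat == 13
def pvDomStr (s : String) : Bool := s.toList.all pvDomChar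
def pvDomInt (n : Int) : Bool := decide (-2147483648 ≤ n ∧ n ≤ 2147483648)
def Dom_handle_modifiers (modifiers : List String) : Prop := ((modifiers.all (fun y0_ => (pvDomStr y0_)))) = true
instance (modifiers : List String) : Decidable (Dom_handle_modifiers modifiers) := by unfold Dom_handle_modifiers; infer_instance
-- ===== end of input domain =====

-- B replaces A's reverse index loop with break by a forward boundary-finding pass plus two slice-based constructions (alternative decomposition, same cost).


def ModifierNames : List String := ["hold", "extend", "toggle", "repeat", "release"]

-- ===== PORT A =====
-- A's countdown loop with break; pyGetD's default "" is never used (every index of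
-- the countdown range is in range of the list), so this is exact.
def handleA_loop (modifiers : List String) : PySem.Dict String Bool → List Int → PySem.Dict String Bool × Option String
  | props, [] => (props, none)
  | props, i :: is =>
    if PySem.List.pyGetD modifiers i "" ∈ ModifierNames then
      handleA_loop modifiers (props.insert (PySem.List.pyGetD modifiers i "") true) is
    else
      (props, some (PySem.Str.join "+" (PySem.List.slice modifiers (some 0) (some (i + 1)))))

def handle_modifiers (modifiers : List String) : (List (String × Bool)) × Option String :=
  let r := handleA_loop modifiers PySem.Dict.empty
      (PySem.List.pyRange ((modifiers.length : Int) - 1) (-1) (-1))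
  (r.1.items, r.2)

-- ===== PORT B =====
-- last index whose element is not a modifier name (forward pass), -1 if none
def lastNonMod (modifiers : List String) : Int :=
  (PySem.List.enumerate modifiers 0).foldl
    (fun acc p => if p.2 ∈ ModifierNames then acc else p.1) (-1)

def handle_modifiers_alt (modifiers : List String) : (List (String × Bool)) × Option String :=
  let last := lastNonMod modifiers
  let rest := if 0 ≤ last
      then some (PySem.Str.join "+" (PySem.List.slice modifiers none (some (last + 1))))
      else none
  let props := ((PySem.List.slice modifiers (some (last + 1)) none).reverse).foldl
      (fun d m => d.insert m true) (PySem.Dict.empty : PySem.Dict String Bool)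
  (props.items, rest)

-- ===== PRECONDITION & SPEC =====
def Spec_handle_modifiers (modifiers : List String) (out : (List (String × Bool)) × Option String) : Prop := out = handle_modifiers_alt modifiers
instance (modifiers : List String) (out : (List (String × Bool)) × Option String) : Decidable (Spec_handle_modifiers modifiers out) := by unfold Spec_handle_modifiers; infer_instance

-- ===== CLAIM (what is proved, stated in full; the proofs are below) =====
def Claim_equal_handle_modifiers : Prop := ∀ (modifiers : List String), Dom_handle_modifiers modifiers → Spec_handle_modifiers modifiers (handle_modifiers modifiers)

-- ===== LEMMAS AND PROOFS =====

theorem enumerate_append {α : Type} (xs ys : List α) (s : Int) :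
    PySem.List.enumerate (xs ++ ys) s
      = PySem.List.enumerate xs s ++ PySem.List.enumerate ys (s + xs.length) := by
  induction xs generalizing s with
  | nil => simp [PySem.List.enumerate_nil]
  | cons x xs ih =>
    simp [PySem.List.enumerate_cons, ih]
    ring_nf

theorem lastNonMod_append_one (xs : List String) (x : String) :
    lastNonMod (xs ++ [x]) = if x ∈ ModifierNames then lastNonMod xs else (xs.length : Int) := by
  unfold lastNonMod
  rw [enumerate_append, List.foldl_append]
  simp [PySem.List.enumerate_cons, PySem.List.enumerate_nil]

theorem lastNonMod_lb (xs : List String) : -1 ≤ lastNonMod xs := by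
  induction xs using List.reverseRecOn with
  | nil => decide
  | append_singleton xs x ih =>
    rw [lastNonMod_append_one]
    split
    · exact ih
    · omega

theorem lastNonMod_ub (xs : List String) : lastNonMod xs < (xs.length : Int) := by
  induction xs using List.reverseRecOn with
  | nil => decide
  | append_singleton xs x ih =>
    rw [lastNonMod_append_one]
    simp only [List.length_append, List.length_cons, List.length_nil]
    split
    · push_cast; omega
    · push_cast; omega

theorem handleA_loop_append (xs : List String) (x : String)
    (d : PySem.Dict String Bool) (is : List Int)
    (h : ∀ i ∈ is, 0 ≤ i ∧ i < (xs.length : Int)) :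
    handleA_loop (xs ++ [x]) d is = handleA_loop xs d is := by
  induction is generalizing d with
  | nil => rfl
  | cons i is ih =>
    obtain ⟨h0, h1⟩ := h i (List.mem_cons_self ..)
    have hget : PySem.List.pyGetD (xs ++ [x]) i "" = PySem.List.pyGetD xs i "" := by
      rw [PySem.List.pyGetD_eq_getElem _ _ h0 (by simp; omega),
          PySem.List.pyGetD_eq_getElem _ _ h0 h1,
          List.getElem_append_left]
    have hslice : PySem.List.slice (xs ++ [x]) (some 0) (some (i + 1))
        = PySem.List.slice xs (some 0) (some (i + 1)) := by
      rw [PySem.List.slice_toNat (xs ++ [x]) (le_refl 0) (by omega),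
          PySem.List.slice_toNat xs (le_refl 0) (by omega)]
      simp only [List.drop_zero, Int.toNat_zero, Nat.sub_zero]
      rw [List.take_append_of_le_length (by omega)]
    unfold handleA_loop
    rw [hget, hslice]
    split
    · exact ih _ (fun j hj => h j (List.mem_cons_of_mem _ hj))
    · rfl

theorem main_lemma (xs : List String) (d : PySem.Dict String Bool) :
    handleA_loop xs d (PySem.List.pyRange ((xs.length : Int) - 1) (-1) (-1))
      = ( ((PySem.List.slice xs (some (lastNonMod xs + 1)) none).reverse).foldl
            (fun d m => d.insert m true) d,
          if 0 ≤ lastNonMod xs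
            then some (PySem.Str.join "+" (PySem.List.slice xs none (some (lastNonMod xs + 1))))
            else none ) := by
  induction xs using List.reverseRecOn generalizing d with
  | nil =>
    rw [show ((List.length ([] : List String) : Int) - 1) = -1 by simp,
        PySem.List.pyRange_neg_one_eq_nil (le_refl _)]
    simp [handleA_loop, lastNonMod, PySem.List.enumerate_nil, PySem.List.slice]
  | append_singleton xs x ih =>
    have hn : ((xs ++ [x]).length : Int) - 1 = (xs.length : Int) := by simp
    rw [hn, PySem.List.pyRange_neg_one_cons (by omega)]
    have hget : PySem.List.pyGetD (xs ++ [x]) (xs.length : Int) "" = x := by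
      rw [PySem.List.pyGetD_eq_getElem _ _ (by omega) (by simp)]
      simp
    have hL0 := lastNonMod_lb xs
    have hL1 := lastNonMod_ub xs
    simp only [handleA_loop, hget]
    rw [lastNonMod_append_one]
    by_cases hx : x ∈ ModifierNames
    · rw [if_pos hx, if_pos hx]
      rw [handleA_loop_append xs x _ _
          (fun i hi => by rw [PySem.List.mem_pyRange_neg_one] at hi; omega)]
      rw [ih]
      have hrest : PySem.List.slice (xs ++ [x]) none (some (lastNonMod xs + 1))
          = PySem.List.slice xs none (some (lastNonMod xs + 1)) := by
        rw [PySem.List.slice_to _ (by omega), PySem.List.slice_to _ (by omega),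
            List.take_append_of_le_length (by omega)]
      have hsuf : PySem.List.slice (xs ++ [x]) (some (lastNonMod xs + 1)) none
          = PySem.List.slice xs (some (lastNonMod xs + 1)) none ++ [x] := by
        rw [PySem.List.slice_from _ (by omega), PySem.List.slice_from _ (by omega),
            List.drop_append_of_le_length (by omega)]
      rw [hrest, hsuf]
      simp
    · rw [if_neg hx, if_neg hx, if_pos (by omega)]
      have hrest : PySem.List.slice (xs ++ [x]) (some 0) (some ((xs.length : Int) + 1))
          = PySem.List.slice (xs ++ [x]) none (some ((xs.length : Int) + 1)) := by
        simp
      have hsuf : PySem.List.slice (xs ++ [x]) (some ((xs.length : Int) + 1)) none = [] := by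
        rw [PySem.List.slice_from _ (by omega)]
        apply List.drop_eq_nil_of_le
        simp
      rw [hrest, hsuf]
      simp

-- ===== VERDICT (by name: the statement is the Claim_ definition above) =====
theorem handle_modifiers_spec : Claim_equal_handle_modifiers := by
  intro modifiers _
  unfold Spec_handle_modifiers handle_modifiers handle_modifiers_alt
  rw [main_lemma]
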